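-- pv_equiv track=rewrite | github.com/flux-abyss/moksha-warp | warp/protocol/compositor.py | _damage_covers_buffer
-- ===== SOURCE A (Python) =====
-- def _damage_covers_buffer(rects: list, bw: int, bh: int) -> bool:
--     """Return True if the union of *rects* covers the entire buffer area.
--
--     Each rect is (x1, y1, x2, y2) in buffer-space pixels.
--     A single full-extent rect is the common fast path.
--     """
--     if not rects:
--         return False  # no damage sent → cannot confirm full coverage
--     # Fast path: any single rect that covers the whole buffer
--     for x1, y1, x2, y2 in rects:
--         if x1 <= 0 and y1 <= 0 and x2 >= bw and y2 >= bh: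
--             return True
--     # General path: build the union bounding box and check
--     ux1 = min(r[0] for r in rects)
--     uy1 = min(r[1] for r in rects)
--     ux2 = max(r[2] for r in rects)
--     uy2 = max(r[3] for r in rects)
--     return ux1 <= 0 and uy1 <= 0 and ux2 >= bw and uy2 >= bh
-- ===== SOURCE B (Python) =====
-- def _damage_covers_buffer(rects: list, bw: int, bh: int) -> bool:
--     """Single pass: fold the union bounding box and test it against the buffer.
--
--     The fast-path scan of the original is redundant (a single full-cover rect
--     also makes the union bounding box cover), so it is dropped.
--     """
--     if not rects:
--         return False
--     ux1, uy1, ux2, uy2 = rects[0]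
--     for x1, y1, x2, y2 in rects[1:]:
--         if x1 < ux1:
--             ux1 = x1
--         if y1 < uy1:
--             uy1 = y1
--         if x2 > ux2:
--             ux2 = x2
--         if y2 > uy2:
--             uy2 = y2
--     return ux1 <= 0 and uy1 <= 0 and ux2 >= bw and uy2 >= bh
-- ===== Notes on version B (the rewrite author's own statement) =====
-- stated objective: simpler
-- what changed: Dropped the redundant fast-path scan and fused the four min/max generator passes into one loop that folds the union bounding box, seeded from the first rect.
import Mathlib
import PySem

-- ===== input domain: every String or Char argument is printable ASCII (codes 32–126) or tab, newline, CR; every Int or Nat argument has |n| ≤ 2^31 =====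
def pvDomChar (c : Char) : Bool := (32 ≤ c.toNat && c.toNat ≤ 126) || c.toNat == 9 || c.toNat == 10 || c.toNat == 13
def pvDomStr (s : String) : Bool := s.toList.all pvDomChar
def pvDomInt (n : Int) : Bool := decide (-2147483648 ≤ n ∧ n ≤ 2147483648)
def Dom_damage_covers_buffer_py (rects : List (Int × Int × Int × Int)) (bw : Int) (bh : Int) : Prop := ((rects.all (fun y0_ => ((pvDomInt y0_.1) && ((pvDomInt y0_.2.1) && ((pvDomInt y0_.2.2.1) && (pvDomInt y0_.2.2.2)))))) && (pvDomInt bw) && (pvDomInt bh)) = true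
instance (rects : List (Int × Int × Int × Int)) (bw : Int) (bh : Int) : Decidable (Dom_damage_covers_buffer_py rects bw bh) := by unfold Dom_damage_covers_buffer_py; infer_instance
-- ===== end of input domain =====

-- B drops A's redundant fast-path scan and fuses the four min/max passes into one
-- bounding-box fold (objective: simpler).


-- ===== PORT A =====
-- A's fast-path loop: return True on the first rect that alone covers the buffer.
def pvAFast (rects : List (Int × Int × Int × Int)) (bw : Int) (bh : Int) : Bool :=
  match rects with
  | [] => false
  | (x1, y1, x2, y2) :: rs =>
    if x1 ≤ 0 && y1 ≤ 0 && bw ≤ x2 && bh ≤ y2 then true else pvAFast rs bw bh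

def damage_covers_buffer_py (rects : List (Int × Int × Int × Int)) (bw : Int) (bh : Int) : Bool :=
  match rects with
  | [] => false
  | r :: rs =>
    if pvAFast (r :: rs) bw bh then true
    else
      -- min/max over the nonempty generator: Python folds min/max starting at the first item
      let ux1 := (rs.map (fun q => q.1)).foldl min r.1
      let uy1 := (rs.map (fun q => q.2.1)).foldl min r.2.1
      let ux2 := (rs.map (fun q => q.2.2.1)).foldl max r.2.2.1
      let uy2 := (rs.map (fun q => q.2.2.2)).foldl max r.2.2.2
      ux1 ≤ 0 && uy1 ≤ 0 && bw ≤ ux2 && bh ≤ uy2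

-- ===== PORT B =====
-- B's single-pass fold of the union bounding box, seeded from the first rect.
def pvBStep (a q : Int × Int × Int × Int) : Int × Int × Int × Int :=
  (if q.1 < a.1 then q.1 else a.1,
   if q.2.1 < a.2.1 then q.2.1 else a.2.1,
   if a.2.2.1 < q.2.2.1 then q.2.2.1 else a.2.2.1,
   if a.2.2.2 < q.2.2.2 then q.2.2.2 else a.2.2.2)

def damage_covers_buffer_py_alt (rects : List (Int × Int × Int × Int)) (bw : Int) (bh : Int) : Bool :=
  match rects with
  | [] => false
  | r :: rs =>
    let u := rs.foldl pvBStep r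
    u.1 ≤ 0 && u.2.1 ≤ 0 && bw ≤ u.2.2.1 && bh ≤ u.2.2.2

-- ===== PRECONDITION & SPEC =====
def Spec_damage_covers_buffer_py (rects : List (Int × Int × Int × Int)) (bw : Int) (bh : Int) (out : Bool) : Prop := out = damage_covers_buffer_py_alt rects bw bh
instance (rects : List (Int × Int × Int × Int)) (bw : Int) (bh : Int) (out : Bool) : Decidable (Spec_damage_covers_buffer_py rects bw bh out) := by unfold Spec_damage_covers_buffer_py; infer_instance

-- ===== CLAIM (what is proved, stated in full; the proofs are below) =====
def Claim_equal_damage_covers_buffer_py : Prop := ∀ (rects : List (Int × Int × Int × Int)) (bw : Int) (bh : Int), Dom_damage_covers_buffer_py rects bw bh → Spec_damage_covers_buffer_py rects bw bh (damage_covers_buffer_py rects bw bh)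

-- ===== LEMMAS AND PROOFS =====

-- One step of B's fold is the componentwise min/min/max/max.
theorem pvBStep_eq (r s : Int × Int × Int × Int) :
    pvBStep r s = (min r.1 s.1, min r.2.1 s.2.1, max r.2.2.1 s.2.2.1, max r.2.2.2 s.2.2.2) := by
  simp only [pvBStep, Prod.mk.injEq, min_def, max_def]
  refine ⟨?_, ?_, ?_, ?_⟩ <;> (split_ifs <;> omega)

-- B's fold computes componentwise min/min/max/max of A's four folds.
theorem pvBStep_components (rs : List (Int × Int × Int × Int)) (r : Int × Int × Int × Int) :
    rs.foldl pvBStep r =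
      ((rs.map (fun q => q.1)).foldl min r.1,
       (rs.map (fun q => q.2.1)).foldl min r.2.1,
       (rs.map (fun q => q.2.2.1)).foldl max r.2.2.1,
       (rs.map (fun q => q.2.2.2)).foldl max r.2.2.2) := by
  induction rs generalizing r with
  | nil => simp
  | cons s rs ih => simp only [List.foldl_cons, List.map_cons, ih, pvBStep_eq]

-- The fold result bounds every element of the seeded list.
theorem pvBStep_bounds (rs : List (Int × Int × Int × Int)) (r q : Int × Int × Int × Int)
    (hq : q ∈ r :: rs) :
    (rs.foldl pvBStep r).1 ≤ q.1 ∧ (rs.foldl pvBStep r).2.1 ≤ q.2.1 ∧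
    q.2.2.1 ≤ (rs.foldl pvBStep r).2.2.1 ∧ q.2.2.2 ≤ (rs.foldl pvBStep r).2.2.2 := by
  induction rs generalizing r q with
  | nil =>
    simp at hq; subst hq; simp
  | cons s rs ih =>
    have hstep : (pvBStep r s).1 ≤ r.1 ∧ (pvBStep r s).2.1 ≤ r.2.1 ∧
        r.2.2.1 ≤ (pvBStep r s).2.2.1 ∧ r.2.2.2 ≤ (pvBStep r s).2.2.2 ∧
        (pvBStep r s).1 ≤ s.1 ∧ (pvBStep r s).2.1 ≤ s.2.1 ∧
        s.2.2.1 ≤ (pvBStep r s).2.2.1 ∧ s.2.2.2 ≤ (pvBStep r s).2.2.2 := by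
      simp only [pvBStep_eq]; omega
    simp only [List.foldl_cons]
    rw [List.mem_cons, List.mem_cons] at hq
    have hhead := ih (pvBStep r s) (pvBStep r s) (List.mem_cons_self ..)
    rcases hq with rfl | rfl | hq
    · exact ⟨hhead.1.trans hstep.1, hhead.2.1.trans hstep.2.1,
        hstep.2.2.1.trans hhead.2.2.1, hstep.2.2.2.1.trans hhead.2.2.2⟩
    · exact ⟨hhead.1.trans hstep.2.2.2.2.1, hhead.2.1.trans hstep.2.2.2.2.2.1,
        hstep.2.2.2.2.2.2.1.trans hhead.2.2.1, hstep.2.2.2.2.2.2.2.trans hhead.2.2.2⟩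
    · exact ih (pvBStep r s) q (List.mem_cons_of_mem _ hq)

-- A's fast path succeeds only if some rect of the list covers the buffer.
theorem pvAFast_mem (rects : List (Int × Int × Int × Int)) (bw bh : Int)
    (h : pvAFast rects bw bh = true) :
    ∃ q ∈ rects, q.1 ≤ 0 ∧ q.2.1 ≤ 0 ∧ bw ≤ q.2.2.1 ∧ bh ≤ q.2.2.2 := by
  induction rects with
  | nil => simp [pvAFast] at h
  | cons r rs ih =>
    obtain ⟨x1, y1, x2, y2⟩ := r
    by_cases hc : x1 ≤ 0 ∧ y1 ≤ 0 ∧ bw ≤ x2 ∧ bh ≤ y2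
    · exact ⟨(x1, y1, x2, y2), by simp, hc⟩
    · rw [pvAFast, if_neg (by simpa using hc)] at h
      obtain ⟨q, hq, hc'⟩ := ih h
      exact ⟨q, List.mem_cons_of_mem _ hq, hc'⟩

-- ===== VERDICT (by name: the statement is the Claim_ definition above) =====
theorem damage_covers_buffer_py_spec : Claim_equal_damage_covers_buffer_py := by
  intro rects bw bh _
  unfold Spec_damage_covers_buffer_py
  match rects with
  | [] => rfl
  | r :: rs =>
    simp only [damage_covers_buffer_py, damage_covers_buffer_py_alt]
    by_cases hf : pvAFast (r :: rs) bw bh = true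
    · rw [if_pos hf]
      obtain ⟨q, hq, h1, h2, h3, h4⟩ := pvAFast_mem _ _ _ hf
      have hb := pvBStep_bounds rs r q hq
      have hgoal : (decide ((rs.foldl pvBStep r).1 ≤ 0) && decide ((rs.foldl pvBStep r).2.1 ≤ 0)
          && decide (bw ≤ (rs.foldl pvBStep r).2.2.1) && decide (bh ≤ (rs.foldl pvBStep r).2.2.2)) = true := by
        simp only [Bool.and_eq_true, decide_eq_true_eq]
        omega
      exact hgoal.symm
    · rw [if_neg hf]
      rw [pvBStep_components]
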